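-- pv_equiv track=rewrite | github.com/Fadi-hamwi/CatRacer | cats.py | feline_fixes
-- ===== SOURCE A (Python) =====
-- def feline_fixes(typed, source, limit):
--     """A diff function for autocorrect that determines how many letters
--     in TYPED need to be substituted to create SOURCE, then adds the difference in
--     their lengths and returns the result.
--
--     Arguments:
--         typed: a starting word
--         source: a string representing a desired goal word
--         limit: a number representing an upper bound on the number of chars that must change
--
--     >>> big_limit = 10
--     >>> feline_fixes("nice", "rice", big_limit)    # Substitute: n -> r
--     1
--     >>> feline_fixes("range", "rungs", big_limit)  # Substitute: a -> u, e -> s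
--     2
--     >>> feline_fixes("pill", "pillage", big_limit) # Don't substitute anything, length difference of 3.
--     3
--     >>> feline_fixes("roses", "arose", big_limit)  # Substitute: r -> a, o -> r, s -> o, e -> s, s -> e
--     5
--     >>> feline_fixes("rose", "hello", big_limit)   # Substitute: r->h, o->e, s->l, e->l, length difference of 1.
--     5
--     """
--     if limit < 0:
--         return 0
--
--     if len(typed) == 0 or len(source) == 0:
--         return len(source) + len(typed)
--
--     if typed[0] == source[0]:
--         return feline_fixes(typed[1:], source[1:], limit)
--
--     return 1 + feline_fixes(typed[1:], source[1:], limit - 1)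
-- ===== SOURCE B (Python) =====
-- def feline_fixes(typed, source, limit):
--     if limit < 0:
--         return 0
--     subs = sum(1 for a, b in zip(typed, source) if a != b)
--     if subs > limit:
--         return limit + 1
--     return subs + abs(len(typed) - len(source))
-- ===== Notes on version B (the rewrite author's own statement) =====
-- stated objective: faster
-- what changed: Replaces A's character-by-character recursion that threads the remaining limit through calls (with O(n) string slicing per step) by a single mismatch count over zip plus a closed-form cutoff (limit+1 if the count exceeds the limit, else count + length difference).
import Mathlib
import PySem

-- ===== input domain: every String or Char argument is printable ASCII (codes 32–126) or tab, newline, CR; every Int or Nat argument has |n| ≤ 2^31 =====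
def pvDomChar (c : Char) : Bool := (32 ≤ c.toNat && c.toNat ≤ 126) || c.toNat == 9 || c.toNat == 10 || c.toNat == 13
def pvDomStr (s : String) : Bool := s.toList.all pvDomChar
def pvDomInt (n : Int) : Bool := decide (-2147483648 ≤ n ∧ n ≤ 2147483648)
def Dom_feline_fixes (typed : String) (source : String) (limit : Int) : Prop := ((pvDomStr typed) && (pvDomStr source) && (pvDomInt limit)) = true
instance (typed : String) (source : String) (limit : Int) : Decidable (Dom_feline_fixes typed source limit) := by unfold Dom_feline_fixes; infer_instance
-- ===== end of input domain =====

-- B replaces A's limit-threading recursion by one mismatch count plus a closed-form cutoff; same values everywhere.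

-- ===== PORT A =====
-- A's recursion, on the character lists (typed[1:] = tail, typed[0] = head).
def felineGoA (t : List Char) (s : List Char) (l : Int) : Int :=
  if l < 0 then 0
  else match t, s with
    | [], s => (s.length : Int)                 -- len(typed)==0: len(source)+len(typed) = len(source)
    | t, [] => (t.length : Int)                 -- len(source)==0: len(source)+len(typed) = len(typed)
    | a :: t', b :: s' =>
        if a = b then felineGoA t' s' l
        else 1 + felineGoA t' s' (l - 1)

def feline_fixes (typed : String) (source : String) (limit : Int) : Int :=
  felineGoA typed.toList source.toList limit

-- ===== PORT B =====
-- sum(1 for a, b in zip(typed, source) if a != b)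
def felineSubs (t : List Char) (s : List Char) : Int :=
  match t, s with
  | a :: t', b :: s' => (if a ≠ b then 1 else 0) + felineSubs t' s'
  | _, _ => 0

def feline_fixes_alt (typed : String) (source : String) (limit : Int) : Int :=
  if limit < 0 then 0
  else
    let subs := felineSubs typed.toList source.toList
    if subs > limit then limit + 1
    else subs + |(typed.toList.length : Int) - (source.toList.length : Int)|

-- ===== PRECONDITION & SPEC =====
def Spec_feline_fixes (typed : String) (source : String) (limit : Int) (out : Int) : Prop := out = feline_fixes_alt typed source limit
instance (typed : String) (source : String) (limit : Int) (out : Int) : Decidable (Spec_feline_fixes typed source limit out) := by unfold Spec_feline_fixes; infer_instance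

-- ===== CLAIM (what is proved, stated in full; the proofs are below) =====
def Claim_equal_feline_fixes : Prop := ∀ (typed : String) (source : String) (limit : Int), Dom_feline_fixes typed source limit → Spec_feline_fixes typed source limit (feline_fixes typed source limit)

-- ===== LEMMAS AND PROOFS =====

theorem felineSubs_nonneg (t s : List Char) : 0 ≤ felineSubs t s := by
  induction t generalizing s with
  | nil => simp [felineSubs]
  | cons a t' ih =>
    cases s with
    | nil => simp [felineSubs]
    | cons b s' =>
      have := ih s'
      by_cases h : a = b <;> simp [felineSubs, h] <;> omega

theorem felineGoA_neg (t s : List Char) (l : Int) (h : l < 0) : felineGoA t s l = 0 := by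
  unfold felineGoA; simp [h]

theorem felineGoA_closed (t : List Char) (s : List Char) (l : Int) (hl : 0 ≤ l) :
    felineGoA t s l =
      if felineSubs t s > l then l + 1
      else felineSubs t s + |(t.length : Int) - (s.length : Int)| := by
  induction t generalizing s l with
  | nil =>
    have h1 : ¬ l < 0 := by omega
    have h2 : |(0 : Int) - (s.length : Int)| = (s.length : Int) := by
      rw [abs_sub_comm, sub_zero]; exact abs_of_nonneg (Int.natCast_nonneg _)
    simp only [felineGoA, felineSubs, h1, if_false, List.length_nil, Nat.cast_zero, h2]
    omega
  | cons a t' ih =>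
    cases s with
    | nil =>
      have h1 : ¬ l < 0 := by omega
      have h2 : |((a :: t').length : Int) - (0 : Int)| = ((a :: t').length : Int) := by
        rw [sub_zero]; exact abs_of_nonneg (Int.natCast_nonneg _)
      simp only [felineGoA, felineSubs, h1, if_false, List.length_nil, Nat.cast_zero, h2]
      omega
    | cons b s' =>
      have h1 : ¬ l < 0 := by omega
      have hlen : ((a :: t').length : Int) - ((b :: s').length : Int)
          = (t'.length : Int) - (s'.length : Int) := by
        push_cast [List.length_cons]; ring
      have hd := felineSubs_nonneg t' s'
      simp only [felineGoA, felineSubs, h1, if_false]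
      rw [hlen]
      by_cases h : a = b
      · rw [if_pos h, if_neg (not_not_intro h), zero_add]
        exact ih s' l hl
      · rw [if_neg h, if_pos h]
        by_cases hl0 : l = 0
        · subst hl0
          rw [felineGoA_neg t' s' (0 - 1) (by omega), if_pos (by omega)]
          ring
        · rw [ih s' (l - 1) (by omega)]
          by_cases hc : felineSubs t' s' > l - 1
          · rw [if_pos hc, if_pos (by omega)]
            ring
          · rw [if_neg hc, if_neg (by omega)]
            ring

-- ===== VERDICT (by name: the statement is the Claim_ definition above) =====
theorem feline_fixes_spec : Claim_equal_feline_fixes := by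
  intro typed source limit _
  unfold Spec_feline_fixes feline_fixes feline_fixes_alt
  by_cases h : limit < 0
  · simp [h, felineGoA_neg _ _ _ h]
  · simp [h, felineGoA_closed typed.toList source.toList limit (by omega)]
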